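-- pv_equiv track=rewrite | github.com/sp1d5r/ViraNovaBackend | serverless_backend/routes/create_short_video.py | merge_consecutive_cuts
-- ===== SOURCE A (Python) =====
-- def merge_consecutive_cuts(cuts, max_duration):
--     if not cuts:
--         return []
--
--     # Start with the first cut, but ensure it doesn't exceed the video duration
--     merged_cuts = [(cuts[0][0], min(cuts[0][1], max_duration))]
--
--     for current_start, current_end in cuts[1:]:
--         last_start, last_end = merged_cuts[-1]
--
--         # Cap the end time to the maximum duration of the video
--         current_end = min(current_end, max_duration)
--
--         # If the current start time is the same as the last end time, merge them
--         if current_start == last_end: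
--             merged_cuts[-1] = (last_start, current_end)  # Extend the last segment
--         else:
--             merged_cuts.append((current_start, current_end))
--
--     return merged_cuts
-- ===== SOURCE B (Python) =====
-- def merge_consecutive_cuts(cuts, max_duration):
--     # Staged "groupby" decomposition: the merge test is local, so
--     # (1) compute a break flag per position from adjacent pairs only,
--     # (2) split the cuts into maximal runs using the flags,
--     # (3) summarise each run independently into one interval.
--     flags = [True] + [b[0] != min(a[1], max_duration) for a, b in zip(cuts, cuts[1:])]
--     groups = []
--     for cut, brk in zip(cuts, flags):
--         if brk:
--             groups.append([cut])
--         else: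
--             groups[-1].append(cut)
--     return [(g[0][0], min(g[-1][1], max_duration)) for g in groups]
-- ===== Notes on version B (the rewrite author's own statement) =====
-- stated objective: alternative
-- what changed: B replaces A's single accumulator pass that mutates merged[-1] by a staged groupby decomposition: a pairwise pass computing local break flags, a grouping pass splitting the cuts into maximal runs, and a final map summarising each run into one interval.
import Mathlib
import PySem

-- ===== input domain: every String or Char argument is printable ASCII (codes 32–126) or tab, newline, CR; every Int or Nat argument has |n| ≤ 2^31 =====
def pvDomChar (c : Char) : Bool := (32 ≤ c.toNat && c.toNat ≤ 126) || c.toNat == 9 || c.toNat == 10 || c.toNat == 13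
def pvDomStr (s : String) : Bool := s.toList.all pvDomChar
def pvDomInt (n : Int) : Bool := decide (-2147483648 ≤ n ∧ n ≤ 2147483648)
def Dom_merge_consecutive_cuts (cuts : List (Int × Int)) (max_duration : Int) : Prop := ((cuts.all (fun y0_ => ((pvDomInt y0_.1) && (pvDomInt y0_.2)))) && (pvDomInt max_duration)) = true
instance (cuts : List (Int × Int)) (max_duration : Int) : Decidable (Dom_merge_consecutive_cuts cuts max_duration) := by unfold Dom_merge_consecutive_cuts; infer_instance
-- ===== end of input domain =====

-- B replaces A's single accumulator pass mutating merged[-1] by a staged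
-- decomposition: pairwise break flags, grouping into maximal runs, then a
-- per-run summary map; objective: alternative decomposition, same cost.

-- ===== PORT A =====
-- forward pass; merged_cuts[-1] read/written via getLast?/dropLast ++ [·]
def merge_consecutive_cuts (cuts : List (Int × Int)) (max_duration : Int) : List (Int × Int) :=
  match cuts with
  | [] => []
  | c0 :: rest =>
    rest.foldl (fun merged c =>
      let last := merged.getLast?.getD (0, 0)
      let current_end := min c.2 max_duration
      if c.1 = last.2 then
        merged.dropLast ++ [(last.1, current_end)]
      else
        merged ++ [(c.1, current_end)])
      [(c0.1, min c0.2 max_duration)]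

-- ===== PORT B =====
-- stage 1: break flags from zip(cuts, cuts[1:]); stage 2: group into runs
-- (groups[-1] read/written via getLast?/dropLast ++ [·]); stage 3: map summary
def merge_consecutive_cuts_alt (cuts : List (Int × Int)) (max_duration : Int) : List (Int × Int) :=
  let flags : List Bool :=
    true :: (cuts.zip (cuts.drop 1)).map (fun ab => decide (ab.2.1 ≠ min ab.1.2 max_duration))
  let groups : List (List (Int × Int)) :=
    (cuts.zip flags).foldl (fun groups cb =>
      if cb.2 then groups ++ [[cb.1]]
      else groups.dropLast ++ [(groups.getLast?.getD []) ++ [cb.1]]) []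
  groups.map (fun g => ((g.headD (0, 0)).1, min (g.getLastD (0, 0)).2 max_duration))

-- ===== PRECONDITION & SPEC =====
def Spec_merge_consecutive_cuts (cuts : List (Int × Int)) (max_duration : Int) (out : List (Int × Int)) : Prop := out = merge_consecutive_cuts_alt cuts max_duration
instance (cuts : List (Int × Int)) (max_duration : Int) (out : List (Int × Int)) : Decidable (Spec_merge_consecutive_cuts cuts max_duration out) := by unfold Spec_merge_consecutive_cuts; infer_instance

-- ===== CLAIM (what is proved, stated in full; the proofs are below) =====
def Claim_equal_merge_consecutive_cuts : Prop := ∀ (cuts : List (Int × Int)) (max_duration : Int), Dom_merge_consecutive_cuts cuts max_duration → Spec_merge_consecutive_cuts cuts max_duration (merge_consecutive_cuts cuts max_duration)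

-- ===== LEMMAS AND PROOFS =====

-- reference recursion for A: current run starts at ps, its capped end so far is pe
def goR (m ps pe : Int) : List (Int × Int) → List (Int × Int)
  | [] => [(ps, pe)]
  | c :: t => if c.1 = pe then goR m ps (min c.2 m) t else (ps, pe) :: goR m c.1 (min c.2 m) t

theorem foldA_eq (m : Int) (t : List (Int × Int)) : ∀ (pref : List (Int × Int)) (ps pe : Int),
    t.foldl (fun merged c =>
      let last := merged.getLast?.getD (0, 0)
      let current_end := min c.2 m
      if c.1 = last.2 then
        merged.dropLast ++ [(last.1, current_end)]
      else
        merged ++ [(c.1, current_end)])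
      (pref ++ [(ps, pe)]) = pref ++ goR m ps pe t := by
  induction t with
  | nil => intro pref ps pe; simp [goR]
  | cons c t ih =>
    intro pref ps pe
    by_cases h : c.1 = pe
    · simpa [goR, h, List.getLast?_concat, List.dropLast_concat] using ih pref ps (min c.2 m)
    · have := ih (pref ++ [(ps, pe)]) c.1 (min c.2 m)
      simpa [goR, h, List.getLast?_concat, List.dropLast_concat] using this

-- the merged result of a whole list
def runsOf (m : Int) : List (Int × Int) → List (Int × Int)
  | [] => []
  | c :: t => goR m c.1 (min c.2 m) t

theorem merge_eq_runs (cuts : List (Int × Int)) (m : Int) :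
    merge_consecutive_cuts cuts m = runsOf m cuts := by
  cases cuts with
  | nil => rfl
  | cons c0 rest =>
    simpa [merge_consecutive_cuts, runsOf] using foldA_eq m rest [] c0.1 (min c0.2 m)

-- reference recursion for B's grouping stage: current group is g (nonempty)
def gr (m : Int) (g : List (Int × Int)) (pe : Int) : List (Int × Int) → List (List (Int × Int))
  | [] => [g]
  | c :: t => if c.1 = pe then gr m (g ++ [c]) (min c.2 m) t else g :: gr m [c] (min c.2 m) t

theorem foldG_eq (m : Int) (t : List (Int × Int)) :
    ∀ (prev : Int × Int) (prefG : List (List (Int × Int))) (g : List (Int × Int)),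
    (t.zip (((prev :: t).zip t).map (fun ab => decide (ab.2.1 ≠ min ab.1.2 m)))).foldl
      (fun groups cb =>
        if cb.2 then groups ++ [[cb.1]]
        else groups.dropLast ++ [(groups.getLast?.getD []) ++ [cb.1]])
      (prefG ++ [g])
    = prefG ++ gr m g (min prev.2 m) t := by
  induction t with
  | nil => intro prev prefG g; simp [gr]
  | cons c t ih =>
    intro prev prefG g
    by_cases h : c.1 = min prev.2 m
    · simpa [gr, h, List.getLast?_concat, List.dropLast_concat] using ih c prefG (g ++ [c])
    · have := ih c (prefG ++ [g]) [c]
      simpa [gr, h] using this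

theorem map_gr (m : Int) (t : List (Int × Int)) :
    ∀ (g : List (Int × Int)), g ≠ [] →
    (gr m g (min (g.getLastD (0, 0)).2 m) t).map
        (fun g => ((g.headD (0, 0)).1, min (g.getLastD (0, 0)).2 m))
      = goR m (g.headD (0, 0)).1 (min (g.getLastD (0, 0)).2 m) t := by
  induction t with
  | nil => intro g hg; simp [gr, goR]
  | cons c t ih =>
    intro g hg
    by_cases h : c.1 = min (g.getLastD (0, 0)).2 m
    · have h1 : (g ++ [c]).getLastD (0, 0) = c := by simp
      have h2 : (g ++ [c]).headD (0, 0) = g.headD (0, 0) := by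
        cases g with
        | nil => exact absurd rfl hg
        | cons a t' => simp
      have := ih (g ++ [c]) (by simp)
      rw [h1, h2] at this
      simp only [gr, goR, h]
      exact this
    · have := ih [c] (by simp)
      simp only [List.getLastD, List.headD] at this
      simp only [gr, goR, h]
      exact congrArg _ this

theorem alt_eq_runs (cuts : List (Int × Int)) (m : Int) :
    merge_consecutive_cuts_alt cuts m = runsOf m cuts := by
  cases cuts with
  | nil => rfl
  | cons c t =>
    have hfold := foldG_eq m t c ([] : List (List (Int × Int))) [c]
    have hmap := map_gr m t [c] (by simp)
    simp only [merge_consecutive_cuts_alt, runsOf, List.drop_one, List.tail_cons,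
      List.zip_cons_cons, List.foldl_cons]
    rw [if_pos trivial, hfold]
    simpa only [List.nil_append] using hmap

-- ===== VERDICT (by name: the statement is the Claim_ definition above) =====
theorem merge_consecutive_cuts_spec : Claim_equal_merge_consecutive_cuts := by
  intro cuts m _
  unfold Spec_merge_consecutive_cuts
  rw [merge_eq_runs, alt_eq_runs]
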